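-- pv_equiv track=rewrite | github.com/dagster-io/erk | packages/erk-shared/src/erk_shared/gateway/github/pr_footer.py | is_header_at_legacy_position
-- ===== SOURCE A (Python) =====
-- HEADER_PATTERNS = (
--     "**Plan:**",
--     "**Remotely executed:**",
-- )
--
-- def _scan_header_from_top(content: str) -> str:
--     """Scan from the top of content for header pattern lines (legacy format).
--
--     In the old format, header lines appeared at the top of the PR body
--     rather than just above the footer separator.
--     """
--     lines = content.split("\n")
--     header_lines: list[str] = []
--
--     for line in lines:
--         if not line.strip():
--             if header_lines:
--                 header_lines.append(line)
--             continue
--         if any(line.startswith(pattern) for pattern in HEADER_PATTERNS):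
--             header_lines.append(line)
--         else:
--             break
--
--     if not header_lines:
--         return ""
--
--     # Remove leading/trailing blank lines
--     while header_lines and not header_lines[0].strip():
--         header_lines.pop(0)
--     while header_lines and not header_lines[-1].strip():
--         header_lines.pop()
--
--     if header_lines:
--         return "\n".join(header_lines) + "\n\n"
--     return ""
--
-- def is_header_at_legacy_position(body: str) -> bool:
--     """Check whether a header exists at the legacy top position but not at the bottom.
--
--     Returns ``True`` when the PR body contains a header block (e.g.
--     ``**Plan:** #123``) at the *top* of the description — the old format —
--     and there is no header at the bottom (new format).  This is the signal
--     that the PR body needs to be migrated.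
--
--     Args:
--         body: Full PR body content
--
--     Returns:
--         True if header is at the legacy top position only
--     """
--     if not body:
--         return False
--
--     # Remove footer first
--     parts = body.rsplit("\n---\n", 1)
--     content_without_footer = parts[0]
--
--     # Check bottom scan — scan from end for header pattern lines
--     lines = content_without_footer.split("\n")
--     found_at_bottom = False
--     for line in reversed(lines):
--         if not line.strip():
--             continue
--         if any(line.startswith(pattern) for pattern in HEADER_PATTERNS):
--             found_at_bottom = True
--         break
--
--     if found_at_bottom:
--         return False
--
--     # Check top scan — if top has a header, it's legacy
--     top_header = _scan_header_from_top(content_without_footer)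
--     return bool(top_header)
-- ===== SOURCE B (Python) =====
-- HEADER_PATTERNS = (
--     "**Plan:**",
--     "**Remotely executed:**",
-- )
--
--
-- def _matches(line):
--     return line is not None and any(line.startswith(p) for p in HEADER_PATTERNS)
--
--
-- def is_header_at_legacy_position(body: str) -> bool:
--     if not body:
--         return False
--     content = body.rsplit("\n---\n", 1)[0]
--     lines = content.split("\n")
--     top = next((l for l in lines if l.strip()), None)
--     bottom = next((l for l in reversed(lines) if l.strip()), None)
--     return _matches(top) and not _matches(bottom)
-- ===== Notes on version B (the rewrite author's own statement) =====
-- stated objective: simpler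
-- what changed: Both scans collapse to checking a single sentinel line: B finds the first and the last non-blank line directly and returns true exactly when the first matches a header pattern and the last does not, dropping A's accumulate-and-trim header-collection loop entirely.
import Mathlib
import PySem

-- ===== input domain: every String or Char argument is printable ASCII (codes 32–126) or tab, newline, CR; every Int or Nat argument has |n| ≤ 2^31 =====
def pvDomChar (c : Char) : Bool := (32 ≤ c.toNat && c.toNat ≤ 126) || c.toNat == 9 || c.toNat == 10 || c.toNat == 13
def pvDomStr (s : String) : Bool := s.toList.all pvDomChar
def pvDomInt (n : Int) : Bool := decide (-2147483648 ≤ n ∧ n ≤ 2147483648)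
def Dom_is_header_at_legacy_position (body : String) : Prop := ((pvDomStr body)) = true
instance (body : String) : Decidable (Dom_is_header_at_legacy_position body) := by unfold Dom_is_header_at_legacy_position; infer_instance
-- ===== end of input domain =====

-- B replaces A's accumulate-and-trim header-collection loop by a direct check that the
-- first non-blank line matches a header pattern and the last non-blank line does not (simpler).

-- shared constants and ports of Python built-ins used by both versions
def pvHeaderPatterns : List (List Char) := ["**Plan:**".toList, "**Remotely executed:**".toList]

def pvBlank (l : List Char) : Bool := (PySem.Chars.strip l).isEmpty

def pvMatches (l : List Char) : Bool := pvHeaderPatterns.any (fun p => PySem.Chars.startswith l p)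

def pvSep : List Char := "\n---\n".toList

-- port of s.rsplit(sep, 1)[0] (sep nonempty): prefix before the LAST occurrence of sep, whole string if absent
def pvRsplit1Prefix (cs sep : List Char) : List Char :=
  match ((List.range (cs.length + 1)).filter
           (fun i => PySem.Chars.startswith (cs.drop i) sep)).getLast? with
  | some i => cs.take i
  | none => cs

-- ===== PORT A =====
def pvScanBottom : List (List Char) → Bool
  | [] => false
  | l :: rest => if pvBlank l then pvScanBottom rest else pvMatches l

def pvScanTopLoop : List (List Char) → List (List Char) → List (List Char)
  | [], acc => acc
  | l :: rest, acc =>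
    if pvBlank l then pvScanTopLoop rest (if acc.isEmpty then acc else acc ++ [l])
    else if pvMatches l then pvScanTopLoop rest (acc ++ [l])
    else acc

def pvTopFromLines (lines : List (List Char)) : List Char :=
  let hl := pvScanTopLoop lines []
  if hl.isEmpty then []
  else
    let hl2 := ((hl.dropWhile pvBlank).reverse.dropWhile pvBlank).reverse
    if hl2.isEmpty then [] else PySem.Chars.join ['\n'] hl2 ++ ['\n', '\n']

def pvScanHeaderFromTop (content : List Char) : List Char :=
  pvTopFromLines (PySem.Chars.splitOn content ['\n'])

def is_header_at_legacy_position (body : String) : Bool :=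
  if body.toList.isEmpty then false
  else
    let content := pvRsplit1Prefix body.toList pvSep
    let lines := PySem.Chars.splitOn content ['\n']
    if pvScanBottom lines.reverse then false
    else !(pvScanHeaderFromTop content).isEmpty

-- ===== PORT B =====
def pvMatchesOpt : Option (List Char) → Bool
  | some l => pvMatches l
  | none => false

def is_header_at_legacy_position_alt (body : String) : Bool :=
  if body.toList.isEmpty then false
  else
    let lines := PySem.Chars.splitOn (pvRsplit1Prefix body.toList pvSep) ['\n']
    pvMatchesOpt (lines.find? (fun l => !pvBlank l)) &&
      !pvMatchesOpt (lines.reverse.find? (fun l => !pvBlank l))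

-- ===== PRECONDITION & SPEC =====
def Spec_is_header_at_legacy_position (body : String) (out : Bool) : Prop := out = is_header_at_legacy_position_alt body
instance (body : String) (out : Bool) : Decidable (Spec_is_header_at_legacy_position body out) := by unfold Spec_is_header_at_legacy_position; infer_instance

-- ===== CLAIM (what is proved, stated in full; the proofs are below) =====
def Claim_equal_is_header_at_legacy_position : Prop := ∀ (body : String), Dom_is_header_at_legacy_position body → Spec_is_header_at_legacy_position body (is_header_at_legacy_position body)

-- ===== LEMMAS AND PROOFS =====

theorem pvScanBottom_eq (ls : List (List Char)) :
    pvScanBottom ls = pvMatchesOpt (ls.find? (fun l => !pvBlank l)) := by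
  induction ls with
  | nil => rfl
  | cons l rest ih =>
    by_cases h : pvBlank l = true <;> simp [pvScanBottom, List.find?, h, ih, pvMatchesOpt]

theorem pvScanTopLoop_prefix (ls acc : List (List Char)) :
    ∃ t, pvScanTopLoop ls acc = acc ++ t := by
  induction ls generalizing acc with
  | nil => exact ⟨[], by simp [pvScanTopLoop]⟩
  | cons l rest ih =>
    by_cases h : pvBlank l = true
    · by_cases ha : acc.isEmpty
      · simpa [pvScanTopLoop, h, ha] using ih acc
      · obtain ⟨t, ht⟩ := ih (acc ++ [l])
        exact ⟨[l] ++ t, by simp [pvScanTopLoop, h, ha, ht]⟩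
    · by_cases hm : pvMatches l = true
      · obtain ⟨t, ht⟩ := ih (acc ++ [l])
        exact ⟨[l] ++ t, by simp [pvScanTopLoop, h, hm, ht]⟩
      · exact ⟨[], by simp [pvScanTopLoop, h, hm]⟩

theorem pvTopFromLines_eq (lines : List (List Char)) :
    (!(pvTopFromLines lines).isEmpty) = pvMatchesOpt (lines.find? (fun l => !pvBlank l)) := by
  induction lines with
  | nil => rfl
  | cons l rest ih =>
    by_cases h : pvBlank l = true
    · have : pvTopFromLines (l :: rest) = pvTopFromLines rest := by
        simp [pvTopFromLines, pvScanTopLoop, h]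
      simp [this, List.find?, h, ih]
    · by_cases hm : pvMatches l = true
      · obtain ⟨t, ht⟩ := pvScanTopLoop_prefix rest [l]
        have hhl : pvScanTopLoop (l :: rest) [] = l :: t := by
          simp [pvScanTopLoop, h, hm, ht]
        have hdrop : (l :: t).dropWhile pvBlank = l :: t := by
          simp [List.dropWhile, h]
        have hne : (((l :: t).reverse.dropWhile pvBlank).reverse).isEmpty = false := by
          by_contra hc
          simp only [Bool.not_eq_false, List.isEmpty_iff, List.reverse_eq_nil_iff,
            List.dropWhile_eq_nil_iff] at hc
          have := hc l (by simp)
          simp [h] at this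
        simp [pvTopFromLines, hhl, hdrop, hne, List.find?, h, pvMatchesOpt, hm,
          List.isEmpty_iff]
        exact ⟨l, Or.inr rfl, by simpa using h⟩
      · have hhl : pvScanTopLoop (l :: rest) [] = [] := by
          simp [pvScanTopLoop, h, hm]
        simp [pvTopFromLines, hhl, List.find?, h, pvMatchesOpt, hm]

-- ===== VERDICT (by name: the statement is the Claim_ definition above) =====
theorem is_header_at_legacy_position_spec : Claim_equal_is_header_at_legacy_position := by
  intro body _
  unfold Spec_is_header_at_legacy_position
  unfold is_header_at_legacy_position is_header_at_legacy_position_alt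
  by_cases hb : body.toList.isEmpty
  · simp [hb]
  · simp only [hb, if_false]
    rw [pvScanBottom_eq, pvScanHeaderFromTop, pvTopFromLines_eq]
    cases hfb : pvMatchesOpt (((PySem.Chars.splitOn (pvRsplit1Prefix body.toList pvSep) ['\n']).reverse).find? (fun l => !pvBlank l)) <;>
      simp [hfb]
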